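-- pv_equiv track=rewrite | github.com/AlicjaStrojecka/WDI-Introdution-to-Computer-Science | Part 1 (Simple Loop Programs)/10_iloczyn_2_fib.py | is_mult
-- ===== SOURCE A (Python) =====
-- def fib(n:int)->int:
--     curr, next = 0, 1
--     i = 0
--     while i <= n:
--         curr, next = next, curr+next
--         i += 1
--     return curr
--
-- def is_mult(n)->bool:
--     result = False
--     j = 0
--     while j <= n:
--         if n == fib(j-1)*fib(j):
--             result = True
--             break
--         j += 1
--     return result
-- ===== SOURCE B (Python) =====
-- def is_mult(n) -> bool:
--     if n < 0:
--         return False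
--     a, b = 0, 1
--     while a * b < n:
--         a, b = b, a + b
--     return a * b == n
-- ===== Notes on version B (the rewrite author's own statement) =====
-- stated objective: faster
-- what changed: B generates the consecutive Fibonacci pairs incrementally and stops at the first product >= n, instead of A's scan of j = 0..n that recomputes fib(j-1) and fib(j) from scratch at every j.
import Mathlib
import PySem

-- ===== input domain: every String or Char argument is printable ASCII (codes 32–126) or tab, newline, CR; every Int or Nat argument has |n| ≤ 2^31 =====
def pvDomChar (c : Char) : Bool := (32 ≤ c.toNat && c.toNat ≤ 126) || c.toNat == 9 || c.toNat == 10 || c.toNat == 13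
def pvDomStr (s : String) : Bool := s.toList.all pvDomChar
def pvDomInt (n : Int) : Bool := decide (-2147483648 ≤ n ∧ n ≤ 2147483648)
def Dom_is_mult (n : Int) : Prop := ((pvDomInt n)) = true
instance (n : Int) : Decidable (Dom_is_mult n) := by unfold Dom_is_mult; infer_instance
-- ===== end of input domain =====

-- B replaces A's rescan (which recomputes fib(j-1), fib(j) from scratch for every j = 0..n)
-- by one incremental Fibonacci-pair loop that stops at the first product ≥ n.

-- ===== PORT A =====
-- A's fib: 'while i <= n' runs max(0, n+1) times; ported with that iteration count as fuel.
def fibLoopA : Nat → Int → Int → Int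
  | 0, curr, _ => curr
  | k + 1, curr, next => fibLoopA k next (curr + next)

def fibA (n : Int) : Int := fibLoopA (n + 1).toNat 0 1

-- A's is_mult: 'while j <= n' runs at most max(0, n+1) times (it breaks early on success).
def isMultLoopA : Nat → Int → Int → Bool
  | 0, _, _ => false
  | k + 1, j, n => if n = fibA (j - 1) * fibA j then true else isMultLoopA k (j + 1) n

def is_mult (n : Int) : Bool := isMultLoopA (n + 1).toNat 0 n

-- ===== PORT B =====
-- fuel n.toNat: the product after k steps is ≥ k, so the 'while a*b < n' loop never needs more.
def altLoopB : Nat → Int → Int → Int → Bool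
  | 0, a, b, n => a * b = n
  | k + 1, a, b, n => if a * b < n then altLoopB k b (a + b) n else a * b = n

def is_mult_alt (n : Int) : Bool := if n < 0 then false else altLoopB n.toNat 0 1 n

-- ===== PRECONDITION & SPEC =====
def Spec_is_mult (n : Int) (out : Bool) : Prop := out = is_mult_alt n
instance (n : Int) (out : Bool) : Decidable (Spec_is_mult n out) := by unfold Spec_is_mult; infer_instance

-- ===== CLAIM (what is proved, stated in full; the proofs are below) =====
def Claim_equal_is_mult : Prop := ∀ (n : Int), Dom_is_mult n → Spec_is_mult n (is_mult n)

-- ===== LEMMAS AND PROOFS =====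

-- Mathematical Fibonacci over Int, F 0 = 0, F 1 = 1.
def F : Nat → Int
  | 0 => 0
  | 1 => 1
  | k + 2 => F k + F (k + 1)

theorem F_nonneg (k : Nat) : 0 ≤ F k := by
  induction k using Nat.strong_induction_on with
  | _ k ih =>
    match k with
    | 0 => simp [F]
    | 1 => simp [F]
    | k + 2 =>
      have h1 := ih k (by omega)
      have h2 := ih (k + 1) (by omega)
      simp only [F]; omega

theorem F_succ_pos (k : Nat) : 1 ≤ F (k + 1) := by
  induction k with
  | zero => simp [F]
  | succ k ih =>
    have := F_nonneg k
    simp only [F]; omega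

def prodF (k : Nat) : Int := F k * F (k + 1)

theorem prodF_succ (k : Nat) : prodF (k + 1) = prodF k + F (k + 1) * F (k + 1) := by
  simp only [prodF, F]; ring

theorem prodF_lt_succ (k : Nat) : prodF k < prodF (k + 1) := by
  have h := F_succ_pos k
  have := prodF_succ k
  nlinarith

theorem prodF_mono {a b : Nat} (h : a ≤ b) : prodF a ≤ prodF b := by
  induction b with
  | zero => have : a = 0 := by omega
            simp [this]
  | succ b ih =>
    rcases Nat.lt_or_ge a (b + 1) with h' | h'
    · exact le_trans (ih (by omega)) (le_of_lt (prodF_lt_succ b))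
    · have : a = b + 1 := by omega
      simp [this]

theorem prodF_ge (k : Nat) : (k : Int) ≤ prodF k := by
  induction k with
  | zero => simp [prodF, F]
  | succ k ih =>
    have h := F_succ_pos k
    have := prodF_succ k
    have : (1 : Int) ≤ F (k + 1) * F (k + 1) := by nlinarith
    push_cast
    omega

theorem fibLoopA_F (fuel m : Nat) : fibLoopA fuel (F m) (F (m + 1)) = F (m + fuel) := by
  induction fuel generalizing m with
  | zero => simp [fibLoopA]
  | succ k ih =>
    have hstep : F m + F (m + 1) = F (m + 1 + 1) := by
      have h2 : m + 1 + 1 = m + 2 := by omega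
      rw [h2]; simp [F]
    simp only [fibLoopA, hstep, ih (m + 1)]
    congr 1; omega

theorem fibA_cast (j : Nat) : fibA (j : Int) = F (j + 1) := by
  have h : ((j : Int) + 1).toNat = j + 1 := by omega
  have h0 : (0 : Int) = F 0 := rfl
  have h1 : (1 : Int) = F (0 + 1) := rfl
  rw [fibA, h, h0, h1, fibLoopA_F]
  congr 1
  omega

theorem fibA_cast_pred (j : Nat) : fibA ((j : Int) - 1) = F j := by
  cases j with
  | zero => simp only [Nat.cast_zero]
            decide
  | succ j =>
    have h : ((j + 1 : Nat) : Int) - 1 = (j : Int) := by push_cast; ring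
    rw [h, fibA_cast]

theorem prodA (j : Nat) : fibA ((j : Int) - 1) * fibA (j : Int) = prodF j := by
  rw [fibA_cast_pred, fibA_cast]; rfl

theorem isMultLoopA_iff (fuel : Nat) : ∀ (j : Nat) (n : Int),
    isMultLoopA fuel (j : Int) n = true ↔ ∃ t < fuel, n = prodF (j + t) := by
  induction fuel with
  | zero => intro j n; simp [isMultLoopA]
  | succ k ih =>
    intro j n
    simp only [isMultLoopA, prodA]
    by_cases h : n = prodF j
    · rw [if_pos h]
      exact iff_of_true rfl ⟨0, by omega, by simpa using h⟩
    · rw [if_neg h]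
      have hcast : (j : Int) + 1 = ((j + 1 : Nat) : Int) := by push_cast; ring
      rw [hcast, ih (j + 1) n]
      constructor
      · rintro ⟨t, ht, heq⟩
        exact ⟨t + 1, by omega, by rw [heq]; congr 1; omega⟩
      · rintro ⟨t, ht, heq⟩
        match t with
        | 0 => exact absurd (by simpa using heq) h
        | t + 1 => exact ⟨t, by omega, by rw [heq]; congr 1; omega⟩

theorem altLoopB_iff (fuel : Nat) : ∀ (m : Nat) (n : Int), n ≤ prodF (m + fuel) →
    (altLoopB fuel (F m) (F (m + 1)) n = true ↔ ∃ t, n = prodF (m + t)) := by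
  induction fuel with
  | zero =>
    intro m n hle
    simp only [altLoopB, decide_eq_true_eq]
    constructor
    · intro h; exact ⟨0, by simpa [prodF] using h.symm⟩
    · rintro ⟨t, rfl⟩
      have h1 : prodF m ≤ prodF (m + t) := prodF_mono (by omega)
      have h2 : prodF (m + t) ≤ prodF (m + 0) := by simpa using hle
      simp only [Nat.add_zero] at h2
      have heq : prodF (m + t) = prodF m := le_antisymm h2 h1
      exact heq.symm
  | succ k ih =>
    intro m n hle
    simp only [altLoopB]
    by_cases h : F m * F (m + 1) < n
    · rw [if_pos h]
      have hstep : F m + F (m + 1) = F (m + 1 + 1) := by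
        have h2 : m + 1 + 1 = m + 2 := by omega
        rw [h2]; simp [F]
      rw [hstep]
      have hle' : n ≤ prodF (m + 1 + k) := by
        have : m + 1 + k = m + (k + 1) := by omega
        rw [this]; exact hle
      rw [ih (m + 1) n hle']
      constructor
      · rintro ⟨t, rfl⟩; exact ⟨t + 1, by congr 1; omega⟩
      · rintro ⟨t, rfl⟩
        match t with
        | 0 => exact absurd h (by simp [prodF])
        | t + 1 => exact ⟨t, by congr 1; omega⟩

    · rw [if_neg h]
      rw [Int.not_lt] at h
      simp only [decide_eq_true_eq]
      constructor
      · intro heq; exact ⟨0, by simpa [prodF] using heq.symm⟩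
      · rintro ⟨t, rfl⟩
        have h1 : prodF m ≤ prodF (m + t) := prodF_mono (by omega)
        have h2 : prodF (m + t) ≤ prodF m := h
        have heq : prodF (m + t) = prodF m := le_antisymm h2 h1
        exact heq.symm

-- ===== VERDICT (by name: the statement is the Claim_ definition above) =====
theorem is_mult_spec : Claim_equal_is_mult := by
  intro n _
  unfold Spec_is_mult is_mult is_mult_alt
  by_cases hneg : n < 0
  · have h1 : (n + 1).toNat = 0 := by omega
    have h2 : n.toNat = 0 := by omega
    rw [if_pos hneg, h1]
    rfl
  · rw [Int.not_lt] at hneg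
    rw [if_neg (by omega)]
    have hA : isMultLoopA (n + 1).toNat 0 n = true ↔ ∃ t < (n + 1).toNat, n = prodF t := by
      have := isMultLoopA_iff (n + 1).toNat 0 n
      simpa using this
    have hB : altLoopB n.toNat 0 1 n = true ↔ ∃ t, n = prodF t := by
      have hle : n ≤ prodF (0 + n.toNat) := by
        have := prodF_ge n.toNat
        simp only [Nat.zero_add]
        omega
      have := altLoopB_iff n.toNat 0 n hle
      simpa [F] using this
    rw [Bool.eq_iff_iff, hA, hB]
    constructor
    · rintro ⟨t, _, rfl⟩; exact ⟨t, rfl⟩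
    · rintro ⟨t, rfl⟩
      refine ⟨t, ?_, rfl⟩
      have := prodF_ge t
      omega
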